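-- pv_equiv track=rewrite | github.com/Joshjayboy/Competitive_Programming | D_Lanterns.py | max_points_from_lanterns
-- ===== SOURCE A (Python) =====
-- import heapq
--
-- def max_points_from_lanterns(n, lanterns):
--     lanterns.sort(key=lambda x: x[0])
--
--     max_heap = []
--     total_points = 0
--     current_on_count = 0
--     i = 0
--
--     for k in range(n):
--         while i < n and lanterns[i][0] <= current_on_count:
--             heapq.heappush(max_heap, -lanterns[i][1])
--             i += 1
--
--         if max_heap:
--             max_points = -heapq.heappop(max_heap)
--             total_points += max_points
--             current_on_count += 1
--
--     return total_points
-- ===== SOURCE B (Python) =====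
-- def max_points_from_lanterns(n, lanterns):
--     lanterns.sort(key=lambda x: x[0])
--
--     rem = lanterns[:n]
--     available = []
--     total = 0
--     cnt = 0
--     for _ in range(n):
--         while rem and rem[0][0] <= cnt:
--             available.append(rem.pop(0)[1])
--         if available:
--             best = max(available)
--             available.remove(best)
--             total += best
--             cnt += 1
--     return total
-- ===== Notes on version B (the rewrite author's own statement) =====
-- stated objective: alternative
-- what changed: Replaces A's index-into-the-sorted-list plus heapq max-heap of negated values by consuming a slice lanterns[:n] head-first as a queue and keeping a plain list of available values with a per-round max-scan and remove; the outer greedy loop is the same strategy.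
import Mathlib
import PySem

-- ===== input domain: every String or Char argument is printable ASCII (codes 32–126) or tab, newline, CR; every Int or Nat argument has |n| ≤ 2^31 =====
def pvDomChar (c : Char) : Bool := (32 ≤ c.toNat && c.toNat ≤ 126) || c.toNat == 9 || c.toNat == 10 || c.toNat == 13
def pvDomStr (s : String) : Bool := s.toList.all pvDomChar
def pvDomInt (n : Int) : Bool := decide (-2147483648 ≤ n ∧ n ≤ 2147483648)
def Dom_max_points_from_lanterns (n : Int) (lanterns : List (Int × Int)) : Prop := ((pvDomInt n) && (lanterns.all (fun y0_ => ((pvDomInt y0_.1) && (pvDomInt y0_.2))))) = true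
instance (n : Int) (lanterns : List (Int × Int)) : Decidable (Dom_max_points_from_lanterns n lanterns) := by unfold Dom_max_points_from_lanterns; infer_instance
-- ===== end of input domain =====

-- B replaces A's index-into-the-sorted-list plus heapq max-heap of negated values by
-- consuming the slice lanterns[:n] head-first as a queue and a plain list of available
-- values with a per-round max-scan (objective: alternative, same greedy, no speed claim).
-- Both Pythons sort the argument list in place; the theorems are about the return value.

-- ===== PORT A =====
-- heapq.heappush/heappop on the (local, unobservable) heap list are ported as the
-- corresponding exact min-priority queue: ordered insertion into an ascending list and
-- popping its head; heappop returns the minimum element exactly as heapq does.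
-- The extra conjunct 'i.toNat < L.length' only totalises the loop: Python raises
-- IndexError exactly there (excluded by Pre_ below).
def pvWhileA (L : List (Int × Int)) (n cnt : Int) (h : List Int) (i : Int) : List Int × Int :=
  if hc : i < n ∧ i.toNat < L.length ∧ (L.getD i.toNat (0, 0)).1 ≤ cnt then
    pvWhileA L n cnt (List.orderedInsert (· ≤ ·) (-(L.getD i.toNat (0, 0)).2) h) (i + 1)
  else (h, i)
termination_by (n - i).toNat
decreasing_by omega

def pvStepA (L : List (Int × Int)) (n : Int) (s : List Int × Int × Int × Int) :
    List Int × Int × Int × Int :=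
  let p := pvWhileA L n s.2.2.1 s.1 s.2.2.2
  match p.1 with
  | [] => ([], s.2.1, s.2.2.1, p.2)
  | m :: rest => (rest, s.2.1 + (-m), s.2.2.1 + 1, p.2)

def max_points_from_lanterns (n : Int) (lanterns : List (Int × Int)) : Int :=
  let L := PySem.List.sorted lanterns (fun x => x.1) false
  ((PySem.List.pyRange 0 n 1).foldl (fun s _ => pvStepA L n s) ([], 0, 0, 0)).2.1

-- ===== PORT B =====
-- 'while rem and rem[0][0] <= cnt: available.append(rem.pop(0)[1])'
def pvFeedB : Int → List (Int × Int) → List Int → List (Int × Int) × List Int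
  | _, [], av => ([], av)
  | cnt, p :: t, av => if p.1 ≤ cnt then pvFeedB cnt t (av ++ [p.2]) else (p :: t, av)

-- 'for _ in range(n)' as counted recursion over the number of remaining rounds
def pvRoundsB (r : Nat) (rem : List (Int × Int)) (av : List Int) (cnt total : Int) : Int :=
  match r with
  | 0 => total
  | r' + 1 =>
    let q := pvFeedB cnt rem av
    match PySem.List.max? q.2 (fun v => v) with
    | none => pvRoundsB r' q.1 q.2 cnt total
    | some best => pvRoundsB r' q.1 ((PySem.List.remove? q.2 best).getD q.2) (cnt + 1) (total + best)

def max_points_from_lanterns_alt (n : Int) (lanterns : List (Int × Int)) : Int :=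
  let L := PySem.List.sorted lanterns (fun x => x.1) false
  pvRoundsB n.toNat (PySem.List.slice L none (some n)) [] 0 0

-- ===== PRECONDITION & SPEC =====
-- Pre_ excludes exactly the inputs on which A raises IndexError: n > len(lanterns)
-- and every lantern eventually becomes available (for every j, more than j lanterns have
-- threshold ≤ j), so the scan runs past the end of the list.
def Pre_max_points_from_lanterns (n : Int) (lanterns : List (Int × Int)) : Prop :=
  n ≤ (lanterns.length : Int) ∨
    ∃ j ∈ List.range lanterns.length, lanterns.countP (fun p => decide (p.1 ≤ (j : Int))) ≤ j
instance (n : Int) (lanterns : List (Int × Int)) : Decidable (Pre_max_points_from_lanterns n lanterns) := by unfold Pre_max_points_from_lanterns; infer_instance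

def pvWitness_max_points_from_lanterns : Int × (List (Int × Int)) := (2, [(0, 5), (1, 3)])

def Spec_max_points_from_lanterns (n : Int) (lanterns : List (Int × Int)) (out : Int) : Prop := out = max_points_from_lanterns_alt n lanterns
instance (n : Int) (lanterns : List (Int × Int)) (out : Int) : Decidable (Spec_max_points_from_lanterns n lanterns out) := by unfold Spec_max_points_from_lanterns; infer_instance

-- ===== CLAIM (what is proved, stated in full; the proofs are below) =====
def Claim_equal_max_points_from_lanterns : Prop := ∀ (n : Int) (lanterns : List (Int × Int)), Dom_max_points_from_lanterns n lanterns → Pre_max_points_from_lanterns n lanterns → Spec_max_points_from_lanterns n lanterns (max_points_from_lanterns n lanterns)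

-- ===== LEMMAS AND PROOFS =====

-- A's fold state (heap, total, cnt, i) corresponds to B's (rem, av, cnt, total)
def pvRel (L : List (Int × Int)) (n : Int) (sA : List Int × Int × Int × Int)
    (rem : List (Int × Int)) (av : List Int) (cnt total : Int) : Prop :=
  sA.2.1 = total ∧ sA.2.2.1 = cnt ∧ 0 ≤ sA.2.2.2 ∧
  rem = (L.take n.toNat).drop sA.2.2.2.toNat ∧
  sA.1.Pairwise (· ≤ ·) ∧ sA.1.Perm (av.map (fun v => -v))

lemma pv_feed_sync (L : List (Int × Int)) (n cnt : Int) :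
    ∀ (k : Nat) (i : Int) (h : List Int) (a : List Int), (n - i).toNat = k → 0 ≤ i →
      h.Pairwise (· ≤ ·) → h.Perm (a.map (fun v => -v)) →
      0 ≤ (pvWhileA L n cnt h i).2 ∧
      (pvFeedB cnt ((L.take n.toNat).drop i.toNat) a).1
        = (L.take n.toNat).drop (pvWhileA L n cnt h i).2.toNat ∧
      (pvWhileA L n cnt h i).1.Pairwise (· ≤ ·) ∧
      (pvWhileA L n cnt h i).1.Perm
        (((pvFeedB cnt ((L.take n.toNat).drop i.toNat) a).2).map (fun v => -v)) := by
  intro k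
  induction k using Nat.strong_induction_on with
  | _ k ih =>
    intro i h a hk hi0 hs hp
    rw [pvWhileA]
    by_cases hc : i < n ∧ i.toNat < L.length ∧ (L.getD i.toNat (0, 0)).1 ≤ cnt
    · have hiR : i.toNat < (L.take n.toNat).length := by
        simp [List.length_take]; omega
      have hdrop : (L.take n.toNat).drop i.toNat
          = (L.take n.toNat)[i.toNat] :: (L.take n.toNat).drop (i.toNat + 1) :=
        List.drop_eq_getElem_cons hiR
      have hget : (L.take n.toNat)[i.toNat] = L[i.toNat]'(hc.2.1) := by
        simp [List.getElem_take]
      have hgetD : L.getD i.toNat (0, 0) = L[i.toNat]'(hc.2.1) :=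
        List.getD_eq_getElem L (0,0) hc.2.1
      have hnext : (i + 1).toNat = i.toNat + 1 := by omega
      rw [hdrop]
      simp only [pvFeedB, dif_pos hc, hget]
      rw [if_pos (by rw [hgetD] at hc; exact hc.2.2)]
      have := ih ((n - (i + 1)).toNat) (by omega) (i + 1)
        (List.orderedInsert (· ≤ ·) (-(L.getD i.toNat (0, 0)).2) h)
        (a ++ [(L[i.toNat]'(hc.2.1)).2]) rfl (by omega)
        (List.Pairwise.orderedInsert _ _ hs)
        (by
          refine (List.perm_orderedInsert _ _ _).trans ?_
          simp only [List.map_append, List.map_cons, List.map_nil, hgetD]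
          exact (hp.cons _).trans (List.perm_append_singleton _ _).symm)
      rw [hnext] at this
      exact this
    · simp only [dif_neg hc]
      refine ⟨hi0, ?_, hs, ?_⟩
      · cases hd : (L.take n.toNat).drop i.toNat with
        | nil => simp [pvFeedB]
        | cons p t =>
          have hiR : i.toNat < (L.take n.toNat).length := by
            by_contra hge
            rw [List.drop_eq_nil_of_le (by omega)] at hd
            exact absurd hd (by simp)
          have hlen : (L.take n.toNat).length = min n.toNat L.length := by
            simp [List.length_take]
          have hcnd : ¬ p.1 ≤ cnt := by
            intro hle
            apply hc
            have hiL : i.toNat < L.length := by omega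
            have hin : i < n := by omega
            have hgetD : L.getD i.toNat (0, 0) = L[i.toNat]'hiL :=
              List.getD_eq_getElem L (0,0) hiL
            have hg : (L.take n.toNat).drop i.toNat
                = (L.take n.toNat)[i.toNat] :: (L.take n.toNat).drop (i.toNat + 1) :=
              List.drop_eq_getElem_cons hiR
            have hp1 : p = L[i.toNat]'hiL := by
              rw [hg] at hd
              have := (List.cons.injEq _ _ _ _).mp hd
              rw [← this.1]
              simp [List.getElem_take]
            exact ⟨hin, hiL, by rw [hgetD, ← hp1]; exact hle⟩
          simp [pvFeedB, if_neg hcnd]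
      · cases hd : (L.take n.toNat).drop i.toNat with
        | nil => simpa [pvFeedB] using hp
        | cons p t =>
          by_cases hcnd : p.1 ≤ cnt
          · exfalso
            have hiR : i.toNat < (L.take n.toNat).length := by
              by_contra hge
              rw [List.drop_eq_nil_of_le (by omega)] at hd
              exact absurd hd (by simp)
            have hlen : (L.take n.toNat).length = min n.toNat L.length := by
              simp [List.length_take]
            apply hc
            have hiL : i.toNat < L.length := by omega
            have hin : i < n := by omega
            have hg : (L.take n.toNat).drop i.toNat
                = (L.take n.toNat)[i.toNat] :: (L.take n.toNat).drop (i.toNat + 1) :=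
              List.drop_eq_getElem_cons hiR
            have hp1 : p = L[i.toNat]'hiL := by
              rw [hg] at hd
              have := (List.cons.injEq _ _ _ _).mp hd
              rw [← this.1]
              simp [List.getElem_take]
            exact ⟨hin, hiL, by rw [List.getD_eq_getElem L (0,0) hiL, ← hp1]; exact hcnd⟩
          · simpa [pvFeedB, if_neg hcnd] using hp

lemma pv_fold_sync (L : List (Int × Int)) (n : Int) :
    ∀ (l : List Int) (sA : List Int × Int × Int × Int)
      (rem : List (Int × Int)) (av : List Int) (cnt total : Int),
      pvRel L n sA rem av cnt total →
      (l.foldl (fun s _ => pvStepA L n s) sA).2.1 = pvRoundsB l.length rem av cnt total := by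
  intro l
  induction l with
  | nil =>
    intro sA rem av cnt total hrel
    exact hrel.1
  | cons x xs ihl =>
    intro sA rem av cnt total hrel
    obtain ⟨hA0, tA, cA, iA⟩ := sA
    obtain ⟨ht, hcnt, hi0, hrem, hs, hp⟩ := hrel
    simp only at ht hcnt hi0 hrem hs hp
    subst ht hcnt hrem
    obtain ⟨hi0', hrem', hs', hp'⟩ :=
      pv_feed_sync L n cA ((n - iA).toNat) iA hA0 av rfl hi0 hs hp
    simp only [List.foldl_cons, List.length_cons]
    rw [pvRoundsB]
    unfold pvStepA
    simp only
    cases hm : (pvWhileA L n cA hA0 iA).1 with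
    | nil =>
      rw [hm] at hp'
      have hav : (pvFeedB cA ((L.take n.toNat).drop iA.toNat) av).2 = [] := by
        have := hp'.symm.eq_nil
        simpa using this
      rw [hav]
      simp only [PySem.List.max?]
      exact ihl _ _ _ _ _ ⟨rfl, rfl, hi0', hrem', by rw [hm] at hs'; exact hs', by simp⟩
    | cons m rest =>
      rw [hm] at hs' hp'
      set aB := (pvFeedB cA ((L.take n.toNat).drop iA.toNat) av).2 with haBdef
      have hne : aB ≠ [] := by
        intro h0
        rw [h0] at hp'
        simp at hp'
      obtain ⟨b, hb⟩ : ∃ b, PySem.List.max? aB (fun v => v) = some b := by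
        cases haB : aB with
        | nil => exact absurd haB hne
        | cons x t => exact ⟨t.foldl max x, by rw [PySem.List.max?_id_cons]⟩
      have hbmem : b ∈ aB := PySem.List.max?_mem hb
      have hbmax : ∀ y ∈ aB, y ≤ b := by
        have := PySem.List.max?_isMax hb
        simpa using this
      have hmb : m = -b := by
        have h1 : m ≤ -b := by
          have hmem : -b ∈ m :: rest := hp'.mem_iff.mpr (List.mem_map.mpr ⟨b, hbmem, rfl⟩)
          rcases List.mem_cons.mp hmem with heq | hmem2
          · omega
          · exact (List.pairwise_cons.mp hs').1 _ hmem2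
        have h2 : -b ≤ m := by
          have hmm : m ∈ aB.map (fun v => -v) := hp'.mem_iff.mp (List.mem_cons_self ..)
          obtain ⟨y, hy, hym⟩ := List.mem_map.mp hmm
          have := hbmax y hy
          omega
        omega
      have hrm : PySem.List.remove? aB b = some (aB.erase b) :=
        PySem.List.remove?_eq_some_erase aB b hbmem
      have hperm_rest : rest.Perm ((aB.erase b).map (fun v => -v)) := by
        have hinj : Function.Injective (fun v : Int => -v) := fun x y hxy => by simpa using hxy
        rw [List.map_erase hinj]
        have := hp'.erase (-b)
        rwa [hmb, List.erase_cons_head] at this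
      rw [hb]
      simp only [hrm, Option.getD_some]
      refine ihl _ _ _ _ _ ⟨by simp [hmb], rfl, hi0', hrem', hs'.of_cons, hperm_rest⟩

-- ===== VERDICT (by name: the statement is the Claim_ definition above) =====
theorem max_points_from_lanterns_spec : Claim_equal_max_points_from_lanterns := by
  intro n lanterns _ _
  unfold Spec_max_points_from_lanterns max_points_from_lanterns max_points_from_lanterns_alt
  show ((PySem.List.pyRange 0 n 1).foldl
      (fun s _ => pvStepA (PySem.List.sorted lanterns (fun x => x.1) false) n s) ([], 0, 0, 0)).2.1
      = pvRoundsB n.toNat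
          (PySem.List.slice (PySem.List.sorted lanterns (fun x => x.1) false) none (some n)) [] 0 0
  generalize PySem.List.sorted lanterns (fun x => x.1) false = L
  by_cases hn : n ≤ 0
  · rw [PySem.List.pyRange_one_eq_nil hn]
    have h0 : n.toNat = 0 := by omega
    rw [h0]
    rfl
  · have hslice : PySem.List.slice L none (some n) = L.take n.toNat := by
      have h1 : (some n : Option Int) = some ((n.toNat : Nat) : Int) := by
        congr 1
        omega
      rw [h1, PySem.List.slice_to_natCast]
    have hlen : (PySem.List.pyRange 0 n 1).length = n.toNat := by
      rw [PySem.List.length_pyRange_one]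
      omega
    rw [hslice]
    have hmain := pv_fold_sync L n (PySem.List.pyRange 0 n 1) ([], 0, 0, 0) (L.take n.toNat) [] 0 0
      ⟨rfl, rfl, by norm_num, by simp, List.Pairwise.nil, by simp⟩
    rw [hlen] at hmain
    exact hmain
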